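-- pv_equiv track=rewrite | github.com/awslabs/amazon-s3-find-and-forget | tests/unit/tasks/test_generate_queries.py | lists_equal_ignoring_order
-- ===== SOURCE A (Python) =====
-- def lists_equal_ignoring_order(a, b):
--     a = a.copy()
--     try:
--         for item in b:
--             a.remove(item)
--     except ValueError:
--         return False
--     return not a
-- ===== SOURCE B (Python) =====
-- def lists_equal_ignoring_order(a, b):
--     return sorted(a) == sorted(b)
-- ===== Notes on version B (the rewrite author's own statement) =====
-- stated objective: simpler
-- what changed: Replaces destructive one-by-one removal from a mutated copy by a one-line sort-both-and-compare.
import Mathlib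
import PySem

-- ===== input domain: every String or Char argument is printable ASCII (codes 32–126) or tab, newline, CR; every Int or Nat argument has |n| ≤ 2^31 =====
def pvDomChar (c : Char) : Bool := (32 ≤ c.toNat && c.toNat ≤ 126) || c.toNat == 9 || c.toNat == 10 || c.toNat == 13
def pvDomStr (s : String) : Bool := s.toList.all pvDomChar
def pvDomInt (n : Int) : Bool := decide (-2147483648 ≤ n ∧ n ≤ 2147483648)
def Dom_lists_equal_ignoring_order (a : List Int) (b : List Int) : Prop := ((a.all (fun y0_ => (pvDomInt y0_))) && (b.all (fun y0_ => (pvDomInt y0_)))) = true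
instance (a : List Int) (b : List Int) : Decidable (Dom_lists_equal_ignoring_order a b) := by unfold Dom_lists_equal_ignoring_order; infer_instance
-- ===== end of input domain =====

-- B replaces A's destructive remove-each-element loop by sorting both lists
-- and comparing them (simpler: a one-line, non-mutating multiset-equality test).

-- ===== PORT A =====
-- the for-loop over b: remove each item from the working copy of a;
-- a ValueError (remove? = none) returns False, at the end return `not a`
def pvRemoveLoop (a : List Int) (b : List Int) : Bool :=
  match b with
  | [] => a.isEmpty
  | item :: bs =>
    match PySem.List.remove? a item with
    | none => false          -- ValueError: return False
    | some a' => pvRemoveLoop a' bs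

def lists_equal_ignoring_order (a : List Int) (b : List Int) : Bool :=
  pvRemoveLoop a b

-- ===== PORT B =====
def lists_equal_ignoring_order_alt (a : List Int) (b : List Int) : Bool :=
  PySem.List.sorted a (fun x => x) == PySem.List.sorted b (fun x => x)

-- ===== PRECONDITION & SPEC =====
def Spec_lists_equal_ignoring_order (a : List Int) (b : List Int) (out : Bool) : Prop := out = lists_equal_ignoring_order_alt a b
instance (a : List Int) (b : List Int) (out : Bool) : Decidable (Spec_lists_equal_ignoring_order a b out) := by unfold Spec_lists_equal_ignoring_order; infer_instance

-- ===== CLAIM (what is proved, stated in full; the proofs are below) =====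
def Claim_equal_lists_equal_ignoring_order : Prop := ∀ (a : List Int) (b : List Int), Dom_lists_equal_ignoring_order a b → Spec_lists_equal_ignoring_order a b (lists_equal_ignoring_order a b)

-- ===== LEMMAS AND PROOFS =====

-- A's removal loop decides multiset equality
theorem pvRemoveLoop_iff (b a : List Int) :
    pvRemoveLoop a b = true ↔ (↑a : Multiset Int) = ↑b := by
  induction b generalizing a with
  | nil =>
    simp [pvRemoveLoop, List.isEmpty_iff]
  | cons x bs ih =>
    cases h : PySem.List.remove? a x with
    | none =>
      have hx : x ∉ a := (PySem.List.remove?_eq_none_iff a x).mp h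
      simp only [pvRemoveLoop, h]
      constructor
      · intro hc; cases hc
      · intro hc
        have hm : x ∈ (↑a : Multiset Int) := by
          rw [hc, ← Multiset.cons_coe]; exact Multiset.mem_cons_self x _
        exact absurd (by simpa using hm) hx
    | some a' =>
      have hx : x ∈ a := by
        by_contra hx
        rw [(PySem.List.remove?_eq_none_iff a x).mpr hx] at h
        cases h
      have ha' : a' = a.erase x := by
        rw [PySem.List.remove?_eq_some_erase a x hx] at h
        exact (Option.some.inj h).symm
      have hxm : x ∈ (↑a : Multiset Int) := by simpa using hx
      simp only [pvRemoveLoop, h, ih, ha']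
      constructor
      · intro hc
        have h2 : x ::ₘ (↑(a.erase x) : Multiset Int) = x ::ₘ ↑bs := by rw [hc]
        rw [← Multiset.coe_erase, Multiset.cons_erase hxm, Multiset.cons_coe] at h2
        exact h2
      · intro hc
        have h2 : (↑a : Multiset Int).erase x = (↑(x :: bs) : Multiset Int).erase x := by
          rw [hc]
        rw [Multiset.coe_erase, ← Multiset.cons_coe, Multiset.erase_cons_head] at h2
        exact h2

-- B's sort-and-compare decides multiset equality
theorem alt_iff (a b : List Int) :
    lists_equal_ignoring_order_alt a b = true ↔ (↑a : Multiset Int) = ↑b := by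
  unfold lists_equal_ignoring_order_alt
  rw [beq_iff_eq, PySem.List.sorted_id_eq_sorted_id_iff_perm]
  exact (Multiset.coe_eq_coe).symm

-- ===== VERDICT (by name: the statement is the Claim_ definition above) =====
theorem lists_equal_ignoring_order_spec : Claim_equal_lists_equal_ignoring_order := by
  intro a b _
  show lists_equal_ignoring_order a b = lists_equal_ignoring_order_alt a b
  have h := (pvRemoveLoop_iff b a).trans (alt_iff a b).symm
  exact Bool.eq_iff_iff.mpr h
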